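-- pv_equiv track=rewrite | github.com/KLiehr/WS2122---Feature-Aggregation-and-Clustering | ProjectApp/add_Attributes/add_C2.py | nextSetAct
-- ===== SOURCE A (Python) =====
-- def nextSetAct(trace, event, act_set):
--
--     # denotes if we have passed the given activity in the trace
--     after = False
--
--     for ev in trace:
--
--         # check if ev's activity is in the set, if we are after the given event
--         if after:
--             if ev['Activity'] in act_set:
--                 return ev['Activity']
--
--         # have we reached the event
--         if event == ev:
--             after = True
--
--     # returns placeholder if there is no subsequent set activity
--     return "NoSetActNext"
-- ===== SOURCE B (Python) =====
-- def nextSetAct(trace, event, act_set):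
--     # Single reverse pass (right fold): walk the trace back-to-front, maintaining
--     # `best` = first in-set activity of the suffix already seen, and recording it
--     # as the answer each time the event is met (the last hit going backwards is
--     # the first occurrence going forwards).
--     best = None
--     result = None
--     for ev in reversed(trace):
--         if ev == event:
--             result = best
--         a = ev.get('Activity')
--         if a in act_set:
--             best = a
--     return result if result is not None else "NoSetActNext"
-- ===== Notes on version B (the rewrite author's own statement) =====
-- stated objective: alternative
-- what changed: Replaces A's forward pass with an after-the-event flag by a single reverse pass (a right fold) that maintains `best` = first in-set activity of the suffix seen so far and records it as the answer at each event occurrence, so the last backward hit (= first forward occurrence) fixes the result.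
import Mathlib
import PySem

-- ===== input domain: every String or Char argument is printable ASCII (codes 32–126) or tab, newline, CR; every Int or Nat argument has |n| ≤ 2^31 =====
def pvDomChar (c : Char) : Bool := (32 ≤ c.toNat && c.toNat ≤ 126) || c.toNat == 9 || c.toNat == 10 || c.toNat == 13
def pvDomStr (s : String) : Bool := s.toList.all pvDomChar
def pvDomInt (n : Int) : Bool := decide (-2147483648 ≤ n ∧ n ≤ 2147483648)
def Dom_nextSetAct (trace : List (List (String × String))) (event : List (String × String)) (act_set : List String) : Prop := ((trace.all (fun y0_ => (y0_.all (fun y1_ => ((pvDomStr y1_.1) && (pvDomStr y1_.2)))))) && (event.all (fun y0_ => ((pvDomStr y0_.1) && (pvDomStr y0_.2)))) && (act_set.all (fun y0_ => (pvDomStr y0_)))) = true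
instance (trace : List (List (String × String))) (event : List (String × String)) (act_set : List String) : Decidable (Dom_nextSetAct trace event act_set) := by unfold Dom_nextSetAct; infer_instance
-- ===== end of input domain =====

-- B replaces A's forward flag-toggling pass by a single reverse pass (right fold)
-- with best/result accumulators; same cost, different algorithmic structure.


-- Python dict equality (order-insensitive; later duplicates in the pair list overwrite earlier)
def dictEq (a b : List (String × String)) : Bool :=
  let da := PySem.Dict.ofList a
  let db := PySem.Dict.ofList b
  da.items.all (fun kv => db.get? kv.1 == some kv.2) &&
  db.items.all (fun kv => da.get? kv.1 == some kv.2)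

-- ===== PORT A =====
-- A's loop: one forward pass with the `after` flag; "KeyError" marks the branch
-- where Python raises KeyError (excluded by Pre_).
def goA (event : List (String × String)) (act_set : List String) :
    List (List (String × String)) → Bool → String
  | [], _ => "NoSetActNext"
  | ev :: rest, after =>
    if after then
      match (PySem.Dict.ofList ev).get? "Activity" with
      | none => "KeyError"
      | some a => if act_set.contains a then a else goA event act_set rest true
    else goA event act_set rest (dictEq event ev)

def nextSetAct (trace : List (List (String × String))) (event : List (String × String)) (act_set : List String) : String :=
  goA event act_set trace false

-- ===== PORT B =====
-- one iteration of Source B's loop; state = (result, best)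
def stepB (event : List (String × String)) (act_set : List String)
    (st : Option String × Option String) (ev : List (String × String)) :
    Option String × Option String :=
  let result := if dictEq ev event then st.2 else st.1
  let best := match (PySem.Dict.ofList ev).get? "Activity" with
    | some a => if act_set.contains a then some a else st.2
    | none => st.2   -- ev.get returns None; None is never in the string set
  (result, best)

def nextSetAct_alt (trace : List (List (String × String))) (event : List (String × String)) (act_set : List String) : String :=
  let st := trace.reverse.foldl (stepB event act_set) (none, none)
  st.1.getD "NoSetActNext"

-- ===== PRECONDITION & SPEC =====
-- Pre_ excludes exactly the inputs on which Python A raises KeyError: after the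
-- first occurrence of `event`, an element lacking the 'Activity' key occurs
-- before any element whose activity is in `act_set`.
def Pre_nextSetAct (trace : List (List (String × String))) (event : List (String × String)) (act_set : List String) : Prop :=
  (match trace.findIdx? (fun ev => dictEq ev event) with
   | none => true
   | some i =>
     match (trace.drop (i + 1)).find?
         (fun ev => (((PySem.Dict.ofList ev).get? "Activity").map (fun a => act_set.contains a)).getD true) with
     | none => true
     | some ev => ((PySem.Dict.ofList ev).get? "Activity").isSome) = true
instance (trace : List (List (String × String))) (event : List (String × String)) (act_set : List String) : Decidable (Pre_nextSetAct trace event act_set) := by unfold Pre_nextSetAct; infer_instance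

def pvWitness_nextSetAct : (List (List (String × String))) × (List (String × String)) × List String :=
  ([[("Activity", "a")], [("Activity", "b")]], [("Activity", "a")], ["b"])

def Spec_nextSetAct (trace : List (List (String × String))) (event : List (String × String)) (act_set : List String) (out : String) : Prop := out = nextSetAct_alt trace event act_set
instance (trace : List (List (String × String))) (event : List (String × String)) (act_set : List String) (out : String) : Decidable (Spec_nextSetAct trace event act_set out) := by unfold Spec_nextSetAct; infer_instance

-- ===== CLAIM (what is proved, stated in full; the proofs are below) =====
def Claim_equal_nextSetAct : Prop := ∀ (trace : List (List (String × String))) (event : List (String × String)) (act_set : List String), Dom_nextSetAct trace event act_set → Pre_nextSetAct trace event act_set → Spec_nextSetAct trace event act_set (nextSetAct trace event act_set)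


-- ===== LEMMAS AND PROOFS =====

theorem dictEq_symm (a b : List (String × String)) : dictEq a b = dictEq b a := by
  simp only [dictEq, Bool.and_comm]

-- B's loop written as a right fold over the trace
def FrB (event : List (String × String)) (act_set : List String)
    (l : List (List (String × String))) : Option String × Option String :=
  l.foldr (fun ev st => stepB event act_set st ev) (none, none)

theorem FrB_cons (event : List (String × String)) (act_set : List String)
    (ev : List (String × String)) (rest : List (List (String × String))) :
    FrB event act_set (ev :: rest) = stepB event act_set (FrB event act_set rest) ev := rfl

-- the "no KeyError in the scan" condition on a suffix
def okScan (act_set : List String) (l : List (List (String × String))) : Prop :=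
  (match l.find?
      (fun ev => (((PySem.Dict.ofList ev).get? "Activity").map (fun a => act_set.contains a)).getD true) with
   | none => true
   | some ev => ((PySem.Dict.ofList ev).get? "Activity").isSome) = true

-- after the flag is set, A's remaining loop computes B's `best` accumulator
theorem goA_true (event : List (String × String)) (act_set : List String)
    (l : List (List (String × String))) (h : okScan act_set l) :
    goA event act_set l true = ((FrB event act_set l).2).getD "NoSetActNext" := by
  induction l with
  | nil => rfl
  | cons ev rest ih =>
    rw [FrB_cons]
    simp only [goA, stepB, if_true]
    cases hg : (PySem.Dict.ofList ev).get? "Activity" with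
    | none =>
      exfalso
      unfold okScan at h
      rw [List.find?_cons_of_pos (by simp [hg])] at h
      simp [hg] at h
    | some a =>
      by_cases hm : a ∈ act_set
      · simp [hm]
      · have hc : act_set.contains a = false := by simpa using hm
        simp only [hc, Bool.false_eq_true, if_false]
        apply ih
        unfold okScan at h ⊢
        rw [List.find?_cons_of_neg (by simp [hg, hm])] at h
        exact h

-- A's full loop (flag still false) computes B's `result` accumulator
theorem goA_false (event : List (String × String)) (act_set : List String)
    (l : List (List (String × String))) (h : Pre_nextSetAct l event act_set) :
    goA event act_set l false = ((FrB event act_set l).1).getD "NoSetActNext" := by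
  induction l with
  | nil => rfl
  | cons ev rest ih =>
    rw [FrB_cons]
    simp only [goA, stepB, if_false, Bool.false_eq_true]
    rw [dictEq_symm event ev]
    unfold Pre_nextSetAct at h
    rw [List.findIdx?_cons] at h
    cases he : dictEq ev event with
    | true =>
      simp only [he, if_true] at h ⊢
      simp only [List.drop_succ_cons, List.drop_zero] at h
      exact goA_true event act_set rest h
    | false =>
      simp only [he] at h ⊢
      apply ih
      unfold Pre_nextSetAct
      cases hf : rest.findIdx? (fun ev => dictEq ev event) with
      | none => simp
      | some i =>
        rw [hf, Option.map_some] at h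
        simpa using h

-- ===== VERDICT (by name: the statement is the Claim_ definition above) =====
theorem nextSetAct_spec : Claim_equal_nextSetAct := by
  intro trace event act_set _ hpre
  unfold Spec_nextSetAct nextSetAct nextSetAct_alt
  rw [List.foldl_reverse]
  exact goA_false event act_set trace hpre
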